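-- pv_equiv track=rewrite | github.com/BillHWChen/python-practice | boundedSquareSum.py | boundedSquareSum2
-- ===== SOURCE A (Python) =====
-- def boundedSquareSum2(a, b, lower, upper):
--     m = len(a)
--     n = len(b)
--     a = [n**2 for n in a]
--     b = [n**2 for n in b]
--     a.sort()
--     b.sort()
--     ans = 0
--     left, right = n - 1, n - 1
--     for i in range(m):
--         # left + 1: the leftmost pointer that all b[k]^2 + a[i]^2 >= lower when k > left + 1
--         # when i get larger, a[i]^2 get larger, so b[k] should be smaller to satisfy the limit
--         # so the leftmost will be samller, so keep left--
--         while left >= 0 and a[i] + b[left] >= lower: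
--             left -= 1
--         # right: the rightmost pointer that all b[k]^2 + a[i]^2 <= upper when k <= right
--         # when i get larger, a[i]^2 get larger, so b[k] should be smaller
--         # so the rightmost will be smaller
--         while right >= 0 and a[i] + b[right] > upper:
--             right -= 1
--         # the b[k] that k in interval [left + 1, right] satisfy the limitation
--         # lower <= b[k]^2 + a[i]^2 <= upper
--         if right > left:
--             ans += right - left
--     return ans
-- ===== SOURCE B (Python) =====
-- def boundedSquareSum2(a, b, lower, upper):
--     ans = 0
--     for x in a:
--         for y in b:
--             s = x * x + y * y
--             if lower <= s <= upper:
--                 ans += 1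
--     return ans
-- ===== Notes on version B (the rewrite author's own statement) =====
-- stated objective: simpler
-- what changed: Replaced the sort-both-arrays coordinated two-pointer sweep by a direct brute-force double loop counting pairs with lower <= x^2+y^2 <= upper; no sorting, no pointer state.
import Mathlib
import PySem

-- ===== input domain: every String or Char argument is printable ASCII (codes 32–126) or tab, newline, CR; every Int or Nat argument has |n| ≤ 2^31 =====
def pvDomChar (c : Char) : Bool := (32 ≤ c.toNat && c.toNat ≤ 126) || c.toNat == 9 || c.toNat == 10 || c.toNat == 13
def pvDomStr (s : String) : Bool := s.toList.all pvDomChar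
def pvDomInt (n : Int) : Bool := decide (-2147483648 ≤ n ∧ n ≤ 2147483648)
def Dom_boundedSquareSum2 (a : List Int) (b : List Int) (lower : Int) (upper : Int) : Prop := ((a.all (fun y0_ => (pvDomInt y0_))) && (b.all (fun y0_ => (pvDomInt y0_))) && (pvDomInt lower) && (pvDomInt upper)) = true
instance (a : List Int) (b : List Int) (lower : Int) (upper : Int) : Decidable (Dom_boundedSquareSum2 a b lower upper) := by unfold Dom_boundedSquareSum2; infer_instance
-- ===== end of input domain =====

-- B replaces A's sort-both + two-pointer sweep with a plain brute-force double loop; equal on all inputs (A is total).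

-- ===== PORT A =====
-- 'while left >= 0 and p(b[left]): left -= 1' with entry value l of left, called with fuel = (l+1).toNat.
-- The index k is always in range when read in A's run (k ≤ n-1), so pyGetD's default 0 is never used.
def pvMoveDown (b : List Int) (p : Int → Bool) : Nat → Int
  | 0 => -1
  | k+1 => if p (PySem.List.pyGetD b (k : Int) 0) then pvMoveDown b p k else (k : Int)

def boundedSquareSum2 (a : List Int) (b : List Int) (lower : Int) (upper : Int) : Int :=
  let m := a.length
  let n := b.length
  let a2 := PySem.List.sorted (a.map (fun x => x * x)) (fun x => x) false
  let b2 := PySem.List.sorted (b.map (fun x => x * x)) (fun x => x) false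
  let res := (PySem.List.pyRange 0 (m : Int) 1).foldl
    (fun (s : Int × Int × Int) i =>
      let ai := PySem.List.pyGetD a2 i 0
      let left := pvMoveDown b2 (fun y => decide (lower ≤ ai + y)) ((s.1 + 1).toNat)
      let right := pvMoveDown b2 (fun y => decide (upper < ai + y)) ((s.2.1 + 1).toNat)
      (left, right, if left < right then s.2.2 + (right - left) else s.2.2))
    (((n : Int) - 1, (n : Int) - 1, 0))
  res.2.2

-- ===== PORT B =====
def boundedSquareSum2_alt (a : List Int) (b : List Int) (lower : Int) (upper : Int) : Int :=
  a.foldl (fun ans x =>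
    b.foldl (fun ans y =>
      let s := x * x + y * y
      if lower ≤ s ∧ s ≤ upper then ans + 1 else ans) ans) 0

-- ===== PRECONDITION & SPEC =====
def Spec_boundedSquareSum2 (a : List Int) (b : List Int) (lower : Int) (upper : Int) (out : Int) : Prop := out = boundedSquareSum2_alt a b lower upper
instance (a : List Int) (b : List Int) (lower : Int) (upper : Int) (out : Int) : Decidable (Spec_boundedSquareSum2 a b lower upper out) := by unfold Spec_boundedSquareSum2; infer_instance

-- ===== CLAIM (what is proved, stated in full; the proofs are below) =====
def Claim_equal_boundedSquareSum2 : Prop := ∀ (a : List Int) (b : List Int) (lower : Int) (upper : Int), Dom_boundedSquareSum2 a b lower upper → Spec_boundedSquareSum2 a b lower upper (boundedSquareSum2 a b lower upper)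

-- ===== LEMMAS AND PROOFS =====

-- count of elements in [L, U]
def pvCIn (xs : List Int) (L U : Int) : Nat := xs.countP (fun y => decide (L ≤ y ∧ y ≤ U))
-- count of elements < L / ≤ U
def pvCLT (xs : List Int) (L : Int) : Nat := xs.countP (fun y => decide (y < L))
def pvCLE (xs : List Int) (U : Int) : Nat := xs.countP (fun y => decide (y ≤ U))

-- On a sorted list a downward-closed predicate holds exactly on the prefix of length countP q.
theorem pv_prefix_char (xs : List Int) (q : Int → Bool)
    (hdc : ∀ u v : Int, u ≤ v → q v = true → q u = true)
    (hs : xs.Pairwise (· ≤ ·)) :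
    ∀ j (hj : j < xs.length), (q xs[j] = true ↔ j < xs.countP q) := by
  induction xs with
  | nil => intro j hj; simp at hj
  | cons x t ih =>
    rcases List.pairwise_cons.mp hs with ⟨hxt, ht⟩
    by_cases hx : q x = true
    · intro j hj
      cases j with
      | zero => simp [hx]
      | succ j =>
        have h := ih ht j (by simpa using hj)
        rw [List.getElem_cons_succ, h, List.countP_cons_of_pos hx]
        omega
    · have htall : ∀ y ∈ t, q y = false := by
        intro y hy
        by_contra h
        exact hx (hdc x y (hxt y hy) (by simpa using h))
      have hct : t.countP q = 0 := by
        rw [List.countP_eq_length_filter, List.length_eq_zero_iff, List.filter_eq_nil_iff]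
        intro y hy; simp [htall y hy]
      intro j hj
      cases j with
      | zero => simp [hx, hct]
      | succ j =>
        have hjl : j < t.length := by simpa using hj
        simp [hx, hct, htall t[j] (List.getElem_mem hjl)]

-- pvMoveDown on a list where the predicate fails exactly below index c returns c - 1.
theorem pv_moveDown_eq (b2 : List Int) (p : Int → Bool) (c : Nat) :
    ∀ fuel : Nat,
    (∀ j (hj : j < b2.length), (p b2[j] = false ↔ j < c)) →
    c ≤ fuel → fuel ≤ b2.length →
    pvMoveDown b2 p fuel = (c : Int) - 1 := by
  intro fuel
  induction fuel with
  | zero => intro _ hc _; interval_cases c; simp [pvMoveDown]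
  | succ k ih =>
    intro hchar hc hf
    have hk : k < b2.length := by omega
    have hget : PySem.List.pyGetD b2 (k : Int) 0 = b2[k] := by
      rw [PySem.List.pyGetD_natCast]; exact List.getD_eq_getElem _ _ hk
    by_cases hp : p b2[k] = true
    · have : ¬ (k < c) := by
        have := (hchar k hk); simp [hp] at this; omega
      simp only [pvMoveDown, hget, hp, if_true]
      exact ih hchar (by omega) (by omega)
    · have hkc : k < c := (hchar k hk).mp (by simpa using hp)
      have : c = k + 1 := by omega
      simp [pvMoveDown, hget, hp, this]

-- A predicate holding exactly on indices [cl, cu) is counted cu - cl times.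
theorem pv_countP_index (q : Int → Bool) :
    ∀ (xs : List Int) (cl cu : Nat),
    (∀ j (hj : j < xs.length), (q xs[j] = true ↔ (cl ≤ j ∧ j < cu))) →
    cu ≤ xs.length →
    xs.countP q = cu - cl := by
  intro xs
  induction xs with
  | nil => intro cl cu _ hcu; simp at hcu ⊢; omega
  | cons x t ih =>
    intro cl cu hchar hcu
    by_cases hx : q x = true
    · have h0 : cl = 0 ∧ 0 < cu := by
        have := (hchar 0 (by simp)).mp (by simpa using hx); simpa using this
      have hrec : t.countP q = (cu - 1) - 0 := by
        apply ih 0 (cu - 1)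
        · intro j hj
          have := hchar (j+1) (by simpa using hj)
          simp only [List.getElem_cons_succ] at this
          rw [this]; omega
        · simp at hcu; omega
      rw [List.countP_cons_of_pos hx, hrec]
      simp only [List.length_cons] at hcu
      omega
    · have h0 : ¬ (cl = 0 ∧ 0 < cu) := by
        intro h
        exact hx ((hchar 0 (by simp)).mpr (by omega))
      have hrec : t.countP q = (cu - 1) - (cl - 1) := by
        apply ih (cl - 1) (cu - 1)
        · intro j hj
          have := hchar (j+1) (by simpa using hj)
          simp only [List.getElem_cons_succ] at this
          rw [this]; omega
        · simp at hcu; omega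
      rw [List.countP_cons_of_neg hx, hrec]
      simp only [List.length_cons] at hcu
      omega

theorem pv_cnt_le_length (xs : List Int) (q : Int → Bool) : xs.countP q ≤ xs.length :=
  List.countP_le_length

-- The main loop of A, read off sorted a-values, accumulates the interval counts.
theorem pv_foldA (b2 : List Int) (lower upper : Int) (hb : b2.Pairwise (· ≤ ·)) :
    ∀ (xs : List Int) (_hxs : xs.Pairwise (· ≤ ·)) (ml mr : Nat) (ans : Int),
    ml ≤ b2.length → mr ≤ b2.length →
    (∀ x ∈ xs, pvCLT b2 (lower - x) ≤ ml) →
    (∀ x ∈ xs, pvCLE b2 (upper - x) ≤ mr) →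
    (xs.foldl
      (fun (s : Int × Int × Int) ai =>
        let left := pvMoveDown b2 (fun y => decide (lower ≤ ai + y)) ((s.1 + 1).toNat)
        let right := pvMoveDown b2 (fun y => decide (upper < ai + y)) ((s.2.1 + 1).toNat)
        (left, right, if left < right then s.2.2 + (right - left) else s.2.2))
      (((ml : Int) - 1, (mr : Int) - 1, ans))).2.2
    = ans + ((xs.map (fun x => (pvCIn b2 (lower - x) (upper - x) : Int))).sum) := by
  intro xs
  induction xs with
  | nil => intro _ ml mr ans _ _ _ _; simp
  | cons x t ih =>
    intro hxs ml mr ans hml hmr hLall hRall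
    rcases List.pairwise_cons.mp hxs with ⟨hxt, ht⟩
    set cl := pvCLT b2 (lower - x) with hcl
    set cu := pvCLE b2 (upper - x) with hcu
    have hcllen : cl ≤ b2.length := pv_cnt_le_length _ _
    have hculen : cu ≤ b2.length := pv_cnt_le_length _ _
    -- characterizations from sortedness
    have hcharL : ∀ j (hj : j < b2.length), ((decide (b2[j] < lower - x)) = true ↔ j < cl) := by
      intro j hj
      simpa [pvCLT] using pv_prefix_char b2 (fun y => decide (y < lower - x))
        (fun u v huv h => decide_eq_true (by have hv := of_decide_eq_true h; omega)) hb j hj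
    have hcharU : ∀ j (hj : j < b2.length), ((decide (b2[j] ≤ upper - x)) = true ↔ j < cu) := by
      intro j hj
      simpa [pvCLE] using pv_prefix_char b2 (fun y => decide (y ≤ upper - x))
        (fun u v huv h => decide_eq_true (by have hv := of_decide_eq_true h; omega)) hb j hj
    have hleft : pvMoveDown b2 (fun y => decide (lower ≤ x + y)) ((((ml : Int) - 1) + 1).toNat)
        = (cl : Int) - 1 := by
      have : (((ml : Int) - 1) + 1).toNat = ml := by omega
      rw [this]
      apply pv_moveDown_eq b2 _ cl ml _ (hLall x (by simp)) hml
      intro j hj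
      have hc := hcharL j hj
      simp only [decide_eq_true_eq] at hc
      simp only [decide_eq_false_iff_not]
      constructor
      · intro h; exact hc.mp (by omega)
      · intro h; have := hc.mpr h; omega
    have hright : pvMoveDown b2 (fun y => decide (upper < x + y)) ((((mr : Int) - 1) + 1).toNat)
        = (cu : Int) - 1 := by
      have : (((mr : Int) - 1) + 1).toNat = mr := by omega
      rw [this]
      apply pv_moveDown_eq b2 _ cu mr _ (hRall x (by simp)) hmr
      intro j hj
      have hc := hcharU j hj
      simp only [decide_eq_true_eq] at hc
      simp only [decide_eq_false_iff_not]
      constructor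
      · intro h; exact hc.mp (by omega)
      · intro h; have := hc.mpr h; omega
    have hin : pvCIn b2 (lower - x) (upper - x) = cu - cl := by
      apply pv_countP_index _ b2 cl cu _ hculen
      intro j hj
      have h1 := hcharL j hj
      have h2 := hcharU j hj
      simp only [decide_eq_true_eq] at h1 h2 ⊢
      constructor
      · intro h; exact ⟨by by_contra hc; exact absurd (h1.mpr (by omega)) (by omega), h2.mp h.2⟩
      · intro h
        refine ⟨?_, h2.mpr h.2⟩
        by_contra hc
        have := h1.mp (by omega); omega
    have hcontrib : (if (cl : Int) - 1 < (cu : Int) - 1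
          then ans + (((cu : Int) - 1) - ((cl : Int) - 1)) else ans)
        = ans + (pvCIn b2 (lower - x) (upper - x) : Int) := by
      rw [hin]; split_ifs with h <;> omega
    simp only [List.foldl_cons, List.map_cons, List.sum_cons, hleft, hright]
    rw [ih ht cl cu _ hcllen hculen
      (by
        intro x' hx'
        have hxx : x ≤ x' := hxt x' hx'
        exact List.countP_mono_left (by intro y _ h; simp at h ⊢; omega))
      (by
        intro x' hx'
        have hxx : x ≤ x' := hxt x' hx'
        exact List.countP_mono_left (by intro y _ h; simp at h ⊢; omega))]
    rw [hcontrib]; ring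

-- B's inner loop counts b-elements whose square lands in the shifted interval.
theorem pv_foldB_inner (b : List Int) (lower upper x ans : Int) :
    b.foldl (fun ans y =>
      let s := x * x + y * y
      if lower ≤ s ∧ s ≤ upper then ans + 1 else ans) ans
    = ans + (pvCIn (b.map (fun y => y * y)) (lower - x * x) (upper - x * x) : Int) := by
  induction b generalizing ans with
  | nil => simp [pvCIn]
  | cons y t ih =>
    simp only [List.foldl_cons]
    rw [ih]
    simp only [List.map_cons, pvCIn, List.countP_cons]
    by_cases h : lower ≤ x * x + y * y ∧ x * x + y * y ≤ upper
    · have hd : lower - x * x ≤ y * y ∧ y * y ≤ upper - x * x := by omega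
      simp only [h, hd, and_self, if_pos, decide_true]
      push_cast
      ring
    · have hd : ¬ (lower - x * x ≤ y * y ∧ y * y ≤ upper - x * x) := by omega
      simp [h]
      omega

theorem pv_foldB (b : List Int) (lower upper : Int) :
    ∀ (xs : List Int) (ans : Int),
    xs.foldl (fun ans x =>
      b.foldl (fun ans y =>
        let s := x * x + y * y
        if lower ≤ s ∧ s ≤ upper then ans + 1 else ans) ans) ans
    = ans + ((xs.map (fun x =>
        (pvCIn (b.map (fun y => y * y)) (lower - x * x) (upper - x * x) : Int))).sum) := by
  intro xs
  induction xs with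
  | nil => simp
  | cons x t ih =>
    intro ans
    simp only [List.foldl_cons, List.map_cons, List.sum_cons]
    rw [pv_foldB_inner, ih]; ring

-- ===== VERDICT (by name: the statement is the Claim_ definition above) =====
theorem boundedSquareSum2_spec : Claim_equal_boundedSquareSum2 := by
  intro a b lower upper _
  unfold Spec_boundedSquareSum2 boundedSquareSum2 boundedSquareSum2_alt
  set a2 := PySem.List.sorted (a.map (fun x => x * x)) (fun x => x) false with ha2
  set b2 := PySem.List.sorted (b.map (fun x => x * x)) (fun x => x) false with hb2
  have ha2len : a2.length = a.length := by
    rw [ha2, PySem.List.length_sorted, List.length_map]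
  have hb2len : b2.length = b.length := by
    rw [hb2, PySem.List.length_sorted, List.length_map]
  have hb2sorted : b2.Pairwise (· ≤ ·) := by
    simpa using PySem.List.sorted_pairwise (b.map (fun x => x * x)) (fun x => x)
  have ha2sorted : a2.Pairwise (· ≤ ·) := by
    simpa using PySem.List.sorted_pairwise (a.map (fun x => x * x)) (fun x => x)
  -- turn the indexed range-fold into a fold over a2
  have hrange : (PySem.List.pyRange 0 (a.length : Int) 1).foldl
      (fun (s : Int × Int × Int) i =>
        let ai := PySem.List.pyGetD a2 i 0
        let left := pvMoveDown b2 (fun y => decide (lower ≤ ai + y)) ((s.1 + 1).toNat)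
        let right := pvMoveDown b2 (fun y => decide (upper < ai + y)) ((s.2.1 + 1).toNat)
        (left, right, if left < right then s.2.2 + (right - left) else s.2.2))
      (((b.length : Int) - 1, (b.length : Int) - 1, 0))
      = a2.foldl
      (fun (s : Int × Int × Int) ai =>
        let left := pvMoveDown b2 (fun y => decide (lower ≤ ai + y)) ((s.1 + 1).toNat)
        let right := pvMoveDown b2 (fun y => decide (upper < ai + y)) ((s.2.1 + 1).toNat)
        (left, right, if left < right then s.2.2 + (right - left) else s.2.2))
      (((b.length : Int) - 1, (b.length : Int) - 1, 0)) := by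
    rw [← ha2len]
    exact PySem.List.foldl_pyRange_zero_pyGetD' a2 0
      (fun s ai =>
        let left := pvMoveDown b2 (fun y => decide (lower ≤ ai + y)) ((s.1 + 1).toNat)
        let right := pvMoveDown b2 (fun y => decide (upper < ai + y)) ((s.2.1 + 1).toNat)
        (left, right, if left < right then s.2.2 + (right - left) else s.2.2)) _
  simp only [hrange]
  rw [pv_foldA b2 lower upper hb2sorted a2 ha2sorted b.length b.length 0
    (by rw [hb2len]) (by rw [hb2len])
    (by intro x _; rw [← hb2len]; exact pv_cnt_le_length _ _)
    (by intro x _; rw [← hb2len]; exact pv_cnt_le_length _ _)]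
  rw [pv_foldB b lower upper a 0]
  -- both sides are now sums of interval counts; identify them up to permutation
  have hperm2 : b2.Perm (b.map (fun y => y * y)) := PySem.List.sorted_perm _ _ _
  have hcnt : ∀ L U : Int, pvCIn b2 L U = pvCIn (b.map (fun y => y * y)) L U := by
    intro L U; exact hperm2.countP_eq _
  have hperma : a2.Perm (a.map (fun x => x * x)) := PySem.List.sorted_perm _ _ _
  have : (a2.map (fun x => (pvCIn b2 (lower - x) (upper - x) : Int))).sum
      = ((a.map (fun x => x * x)).map (fun x => (pvCIn b2 (lower - x) (upper - x) : Int))).sum :=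
    (hperma.map _).sum_eq
  have hmaps : (a.map ((fun x => (pvCIn b2 (lower - x) (upper - x) : Int)) ∘ fun x => x * x))
      = a.map (fun x => (pvCIn (b.map (fun y => y * y)) (lower - x * x) (upper - x * x) : Int)) :=
    List.map_congr_left (fun x _ => by simp [Function.comp, hcnt])
  rw [zero_add, zero_add, this, List.map_map, hmaps]
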